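-- pv_equiv track=rewrite | github.com/Syed-Saadan-Uddin/Chess-And-Checkers-Player-vs-AI- | Main_Chess_Checkers_Combined.py | evaluate
-- ===== SOURCE A (Python) =====
-- def evaluate(board):
--     # Simple evaluation function, counts the material balance
--     score = 0
--     for row in board:
--         for piece in row:
--             if piece == 'P':
--                 score += 1
--             elif piece == 'N':
--                 score += 3
--             elif piece == 'B':
--                 score += 3
--             elif piece == 'R':
--                 score += 5
--             elif piece == 'Q':
--                 score += 9
--             elif piece == 'p':
--                 score -= 1
--             elif piece == 'n':
--                 score -= 3
--             elif piece == 'b':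
--                 score -= 3
--             elif piece == 'r':
--                 score -= 5
--             elif piece == 'q':
--                 score -= 9
--     return score
-- ===== SOURCE B (Python) =====
-- PIECE_VALUES = {'P': 1, 'N': 3, 'B': 3, 'R': 5, 'Q': 9,
--                 'p': -1, 'n': -3, 'b': -3, 'r': -5, 'q': -9}
--
-- def evaluate(board):
--     # Flatten the board once, then take a weighted sum over the distinct
--     # piece types: value * number of occurrences of that piece.
--     flat = [piece for row in board for piece in row]
--     return sum(v * flat.count(p) for p, v in PIECE_VALUES.items())
-- ===== Notes on version B (the rewrite author's own statement) =====
-- stated objective: alternative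
-- what changed: Replaces the per-square if/elif chain with a flatten-then-count decomposition: one weighted sum over the ten piece types, each weighted by its occurrence count in the flattened board.
import Mathlib
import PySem

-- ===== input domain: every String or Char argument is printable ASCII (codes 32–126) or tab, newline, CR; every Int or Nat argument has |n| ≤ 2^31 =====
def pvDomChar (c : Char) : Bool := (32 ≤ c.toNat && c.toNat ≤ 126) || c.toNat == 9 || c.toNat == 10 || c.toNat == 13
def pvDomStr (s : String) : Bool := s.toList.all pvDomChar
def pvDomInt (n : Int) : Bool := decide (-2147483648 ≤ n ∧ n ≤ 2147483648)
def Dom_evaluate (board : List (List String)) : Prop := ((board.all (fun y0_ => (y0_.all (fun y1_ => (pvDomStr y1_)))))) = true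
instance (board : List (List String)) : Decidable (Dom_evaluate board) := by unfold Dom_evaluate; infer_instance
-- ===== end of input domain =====

-- B replaces A's per-square if/elif chain with a flatten-then-count weighted sum over the ten piece types (alternative decomposition, same cost).


-- ===== PORT A =====
def evaluate (board : List (List String)) : Int :=
  board.foldl (fun score row =>
    row.foldl (fun s piece =>
      if piece = "P" then s + 1
      else if piece = "N" then s + 3
      else if piece = "B" then s + 3
      else if piece = "R" then s + 5
      else if piece = "Q" then s + 9
      else if piece = "p" then s - 1
      else if piece = "n" then s - 3
      else if piece = "b" then s - 3
      else if piece = "r" then s - 5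
      else if piece = "q" then s - 9
      else s) score) 0

-- ===== PORT B =====
def pieceValues : List (String × Int) :=
  [("P", 1), ("N", 3), ("B", 3), ("R", 5), ("Q", 9),
   ("p", -1), ("n", -3), ("b", -3), ("r", -5), ("q", -9)]

def evaluate_alt (board : List (List String)) : Int :=
  let flat := board.flatMap (fun row => row)
  pieceValues.foldl (fun acc pv => acc + pv.2 * (PySem.List.count flat pv.1 : Int)) 0

-- ===== PRECONDITION & SPEC =====
def Spec_evaluate (board : List (List String)) (out : Int) : Prop := out = evaluate_alt board
instance (board : List (List String)) (out : Int) : Decidable (Spec_evaluate board out) := by unfold Spec_evaluate; infer_instance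

-- ===== CLAIM (what is proved, stated in full; the proofs are below) =====
def Claim_equal_evaluate : Prop := ∀ (board : List (List String)), Dom_evaluate board → Spec_evaluate board (evaluate board)

-- ===== LEMMAS AND PROOFS =====
def wt (piece : String) : Int :=
  if piece = "P" then 1
  else if piece = "N" then 3
  else if piece = "B" then 3
  else if piece = "R" then 5
  else if piece = "Q" then 9
  else if piece = "p" then -1
  else if piece = "n" then -3
  else if piece = "b" then -3
  else if piece = "r" then -5
  else if piece = "q" then -9
  else 0

-- A's inner step adds wt of the piece
lemma stepA_eq (s : Int) (piece : String) :
    (if piece = "P" then s + 1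
      else if piece = "N" then s + 3
      else if piece = "B" then s + 3
      else if piece = "R" then s + 5
      else if piece = "Q" then s + 9
      else if piece = "p" then s - 1
      else if piece = "n" then s - 3
      else if piece = "b" then s - 3
      else if piece = "r" then s - 5
      else if piece = "q" then s - 9
      else s) = s + wt piece := by
  simp only [wt]; split_ifs <;> ring

-- A's row loop adds the weights of the row's pieces
lemma row_foldl_eq (row : List String) (s : Int) :
    row.foldl (fun s piece =>
      if piece = "P" then s + 1
      else if piece = "N" then s + 3
      else if piece = "B" then s + 3
      else if piece = "R" then s + 5
      else if piece = "Q" then s + 9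
      else if piece = "p" then s - 1
      else if piece = "n" then s - 3
      else if piece = "b" then s - 3
      else if piece = "r" then s - 5
      else if piece = "q" then s - 9
      else s) s = s + (row.map wt).sum := by
  induction row generalizing s with
  | nil => simp
  | cons x l ih =>
      rw [List.foldl_cons, stepA_eq, ih, List.map_cons, List.sum_cons]
      ring

lemma evaluate_aux (bs : List (List String)) (z : Int) :
    bs.foldl (fun score row => row.foldl (fun s piece =>
      if piece = "P" then s + 1
      else if piece = "N" then s + 3
      else if piece = "B" then s + 3
      else if piece = "R" then s + 5
      else if piece = "Q" then s + 9
      else if piece = "p" then s - 1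
      else if piece = "n" then s - 3
      else if piece = "b" then s - 3
      else if piece = "r" then s - 5
      else if piece = "q" then s - 9
      else s) score) z
      = z + ((bs.flatMap (fun row => row)).map wt).sum := by
  induction bs generalizing z with
  | nil => simp
  | cons r bs ih =>
      rw [List.foldl_cons, row_foldl_eq, ih, List.flatMap_cons, List.map_append,
        List.sum_append]
      ring

lemma evaluate_eq_sum (board : List (List String)) :
    evaluate board = ((board.flatMap (fun row => row)).map wt).sum := by
  unfold evaluate
  rw [evaluate_aux]
  ring

-- B's weighted count sum also equals the weight sum over the flattened list
lemma counts_eq_sum (l : List String) :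
    pieceValues.foldl (fun acc pv => acc + pv.2 * (PySem.List.count l pv.1 : Int)) 0
      = (l.map wt).sum := by
  simp only [pieceValues, List.foldl_cons, List.foldl_nil, PySem.List.count_eq]
  induction l with
  | nil => simp
  | cons x t ih =>
      by_cases h0 : x = "P"
      · subst h0
        simp only [wt, List.count_cons, List.map_cons, List.sum_cons, ← ih]
        norm_num
        ring
      by_cases h1 : x = "N"
      · subst h1
        simp only [wt, List.count_cons, List.map_cons, List.sum_cons, ← ih]
        norm_num
        push_cast
        ring
      by_cases h2 : x = "B"
      · subst h2
        simp only [wt, List.count_cons, List.map_cons, List.sum_cons, ← ih]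
        norm_num
        push_cast
        ring
      by_cases h3 : x = "R"
      · subst h3
        simp only [wt, List.count_cons, List.map_cons, List.sum_cons, ← ih]
        norm_num
        push_cast
        ring
      by_cases h4 : x = "Q"
      · subst h4
        simp only [wt, List.count_cons, List.map_cons, List.sum_cons, ← ih]
        norm_num
        push_cast
        ring
      by_cases h5 : x = "p"
      · subst h5
        simp only [wt, List.count_cons, List.map_cons, List.sum_cons, ← ih]
        norm_num
        push_cast
        ring
      by_cases h6 : x = "n"
      · subst h6
        simp only [wt, List.count_cons, List.map_cons, List.sum_cons, ← ih]
        norm_num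
        push_cast
        ring
      by_cases h7 : x = "b"
      · subst h7
        simp only [wt, List.count_cons, List.map_cons, List.sum_cons, ← ih]
        norm_num
        push_cast
        ring
      by_cases h8 : x = "r"
      · subst h8
        simp only [wt, List.count_cons, List.map_cons, List.sum_cons, ← ih]
        norm_num
        push_cast
        ring
      by_cases h9 : x = "q"
      · subst h9
        simp only [wt, List.count_cons, List.map_cons, List.sum_cons, ← ih]
        norm_num
        push_cast
        ring
      simp only [wt, List.count_cons, List.map_cons, List.sum_cons, ← ih,
        if_neg h0, if_neg h1, if_neg h2, if_neg h3, if_neg h4, if_neg h5,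
        if_neg h6, if_neg h7, if_neg h8, if_neg h9]
      have : ∀ p : String, x ≠ p → (x == p) = false := fun p hp => beq_eq_false_iff_ne.mpr hp
      rw [this _ h0, this _ h1, this _ h2, this _ h3, this _ h4, this _ h5,
        this _ h6, this _ h7, this _ h8, this _ h9]
      norm_num

-- ===== VERDICT (by name: the statement is the Claim_ definition above) =====
theorem evaluate_spec : Claim_equal_evaluate := by
  intro board _
  unfold Spec_evaluate evaluate_alt
  rw [counts_eq_sum, evaluate_eq_sum]
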